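-- pv_equiv track=rewrite | github.com/arthuss/visionexe | engine/workers/restore_chapter_14_structure.py | slice_section
-- ===== SOURCE A (Python) =====
-- def slice_section(lines, start_prefix, end_prefixes):
--     section = []
--     capture = False
--     for line in lines:
--         if line.startswith(start_prefix):
--             capture = True
--         elif capture and any(line.startswith(prefix) for prefix in end_prefixes):
--             break
--         if capture:
--             section.append(line)
--     return section
-- ===== SOURCE B (Python) =====
-- def slice_section(lines, start_prefix, end_prefixes):
--     start = next((i for i, line in enumerate(lines) if line.startswith(start_prefix)), None)
--     if start is None:
--         return []
--     for j in range(start + 1, len(lines)):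
--         line = lines[j]
--         if line.startswith(start_prefix):
--             continue
--         if any(line.startswith(p) for p in end_prefixes):
--             return list(lines[start:j])
--     return list(lines[start:])
-- ===== Notes on version B (the rewrite author's own statement) =====
-- stated objective: simpler
-- what changed: Replaces the capture-flag accumulator loop with locating the first start-prefix index, scanning forward for the first end line, and returning one slice of the input.
import Mathlib
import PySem

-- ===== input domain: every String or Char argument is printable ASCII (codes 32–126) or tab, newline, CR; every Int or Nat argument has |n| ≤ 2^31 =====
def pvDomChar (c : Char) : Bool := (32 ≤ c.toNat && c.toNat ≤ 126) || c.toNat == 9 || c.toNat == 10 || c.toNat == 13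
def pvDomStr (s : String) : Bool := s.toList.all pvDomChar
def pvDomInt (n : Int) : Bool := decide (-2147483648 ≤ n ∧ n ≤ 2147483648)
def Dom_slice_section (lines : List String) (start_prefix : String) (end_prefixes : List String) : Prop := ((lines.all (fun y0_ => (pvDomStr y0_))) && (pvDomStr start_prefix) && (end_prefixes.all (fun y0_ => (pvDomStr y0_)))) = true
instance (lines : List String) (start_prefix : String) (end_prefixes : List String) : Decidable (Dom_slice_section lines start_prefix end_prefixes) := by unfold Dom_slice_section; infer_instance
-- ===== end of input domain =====

-- B replaces A's capture-flag accumulator loop by locating the first start-prefix index,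
-- scanning forward for the first end line, and returning a single slice (objective: simpler).

-- ===== PORT A =====
-- the for-loop of A: state = (section accumulator, capture flag); 'break' returns the accumulator
def sliceALoop (sp : String) (eps : List String) : List String → List String → Bool → List String
  | [], sec, _ => sec
  | l :: ls, sec, cap =>
    if PySem.Str.startswith l sp then
      sliceALoop sp eps ls (sec ++ [l]) true
    else if cap && eps.any (fun p => PySem.Str.startswith l p) then
      sec
    else if cap then
      sliceALoop sp eps ls (sec ++ [l]) cap
    else
      sliceALoop sp eps ls sec cap

def slice_section (lines : List String) (start_prefix : String) (end_prefixes : List String) : List String :=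
  sliceALoop start_prefix end_prefixes lines [] false

-- ===== PORT B =====
-- Source B's 'for j in range(start+1, len(lines))' loop, returning the index j where it returns, none if it falls through
def findEndB (lines : List String) (sp : String) (eps : List String) (j : Nat) : Option Nat :=
  if h : j < lines.length then
    if PySem.Str.startswith lines[j]! sp then findEndB lines sp eps (j + 1)
    else if eps.any (fun p => PySem.Str.startswith lines[j]! p) then some j
    else findEndB lines sp eps (j + 1)
  else none
termination_by lines.length - j

def slice_section_alt (lines : List String) (start_prefix : String) (end_prefixes : List String) : List String :=
  match lines.findIdx? (fun l => PySem.Str.startswith l start_prefix) with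
  | none => []
  | some start =>
    match findEndB lines start_prefix end_prefixes (start + 1) with
    | some j => PySem.List.slice lines (some (start : Int)) (some (j : Int))
    | none => PySem.List.slice lines (some (start : Int)) none

-- ===== PRECONDITION & SPEC =====
def Spec_slice_section (lines : List String) (start_prefix : String) (end_prefixes : List String) (out : List String) : Prop := out = slice_section_alt lines start_prefix end_prefixes
instance (lines : List String) (start_prefix : String) (end_prefixes : List String) (out : List String) : Decidable (Spec_slice_section lines start_prefix end_prefixes out) := by unfold Spec_slice_section; infer_instance

-- ===== CLAIM (what is proved, stated in full; the proofs are below) =====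
def Claim_equal_slice_section : Prop := ∀ (lines : List String) (start_prefix : String) (end_prefixes : List String), Dom_slice_section lines start_prefix end_prefixes → Spec_slice_section lines start_prefix end_prefixes (slice_section lines start_prefix end_prefixes)

-- ===== LEMMAS AND PROOFS =====

-- common characterisation of the captured suffix
def gSec (sp : String) (eps : List String) : List String → List String
  | [] => []
  | l :: ls =>
    if PySem.Str.startswith l sp then l :: gSec sp eps ls
    else if eps.any (fun p => PySem.Str.startswith l p) then []
    else l :: gSec sp eps ls

theorem sliceALoop_true (sp : String) (eps : List String) :
    ∀ (ls sec : List String), sliceALoop sp eps ls sec true = sec ++ gSec sp eps ls := by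
  intro ls
  induction ls with
  | nil => intro sec; simp only [sliceALoop, gSec, List.append_nil]
  | cons l ls ih =>
    intro sec
    simp only [sliceALoop, gSec]
    by_cases h1 : PySem.Str.startswith l sp = true
    · rw [if_pos h1, if_pos h1, ih]; simp
    · rw [if_neg h1, if_neg h1, Bool.true_and]
      by_cases h2 : eps.any (fun p => PySem.Str.startswith l p) = true
      · rw [if_pos h2, if_pos h2]; simp
      · rw [if_neg h2, if_neg h2, if_pos trivial, ih]; simp

theorem sliceALoop_false (sp : String) (eps : List String) :
    ∀ (lines sec : List String),
      sliceALoop sp eps lines sec false =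
        match lines.findIdx? (fun l => PySem.Str.startswith l sp) with
        | none => sec
        | some i => sec ++ gSec sp eps (lines.drop i) := by
  intro lines
  induction lines with
  | nil => intro sec; simp [sliceALoop]
  | cons l ls ih =>
    intro sec
    simp only [sliceALoop, List.findIdx?_cons]
    by_cases h1 : PySem.Str.startswith l sp = true
    · rw [if_pos h1, if_pos h1, sliceALoop_true]
      simp only [List.drop_zero, gSec, if_pos h1, List.append_assoc, List.singleton_append]
    · rw [if_neg h1, if_neg h1, Bool.false_and, if_neg (by simp), if_neg (by simp), ih]
      cases h : ls.findIdx? (fun l => PySem.Str.startswith l sp) <;> simp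

theorem findIdx?_spec {α : Type} [Inhabited α] (p : α → Bool) :
    ∀ (xs : List α) (i : Nat), xs.findIdx? p = some i → i < xs.length ∧ p (xs.getD i default) = true := by
  intro xs
  induction xs with
  | nil => intro i h; simp at h
  | cons x xs ih =>
    intro i h
    rw [List.findIdx?_cons] at h
    by_cases hp : p x = true
    · simp [hp] at h; subst h; simpa using hp
    · simp [hp] at h
      obtain ⟨j, hj, rfl⟩ := h
      obtain ⟨h1, h2⟩ := ih j hj
      exact ⟨by simpa using Nat.succ_lt_succ h1, by simpa using h2⟩

theorem findEndB_ge (lines : List String) (sp : String) (eps : List String) :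
    ∀ (n k j : Nat), lines.length - k ≤ n → findEndB lines sp eps k = some j → k ≤ j := by
  intro n
  induction n with
  | zero =>
    intro k j hn h
    rw [findEndB, dif_neg (by omega)] at h
    exact absurd h (by simp)
  | succ n ih =>
    intro k j hn h
    rw [findEndB] at h
    by_cases hk : k < lines.length
    · rw [dif_pos hk] at h
      by_cases h1 : PySem.Str.startswith lines[k]! sp = true
      · rw [if_pos h1] at h
        have := ih (k + 1) j (by omega) h; omega
      · rw [if_neg h1] at h
        by_cases h2 : eps.any (fun p => PySem.Str.startswith lines[k]! p) = true
        · rw [if_pos h2] at h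
          cases h; omega
        · rw [if_neg h2] at h
          have := ih (k + 1) j (by omega) h; omega
    · rw [dif_neg hk] at h
      exact absurd h (by simp)

theorem findEndB_gSec (lines : List String) (sp : String) (eps : List String) :
    ∀ (n k : Nat), lines.length - k ≤ n →
      (match findEndB lines sp eps k with
       | some j => (lines.drop k).take (j - k)
       | none => lines.drop k) = gSec sp eps (lines.drop k) := by
  intro n
  induction n with
  | zero =>
    intro k hn
    rw [findEndB, dif_neg (by omega), List.drop_eq_nil_of_le (by omega)]
    simp [gSec]
  | succ n ih =>
    intro k hn
    by_cases hk : k < lines.length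
    · have hdrop : lines.drop k = lines[k] :: lines.drop (k + 1) := List.drop_eq_getElem_cons hk
      have hbang : lines[k]! = lines[k] := getElem!_pos lines k hk
      rw [findEndB, dif_pos hk, hbang, hdrop]
      by_cases h1 : PySem.Str.startswith lines[k] sp = true
      · rw [if_pos h1]
        simp only [gSec, if_pos h1]
        cases h : findEndB lines sp eps (k + 1) with
        | none =>
          have h0 := ih (k + 1) (by omega)
          rw [h] at h0
          have h0' : List.drop (k + 1) lines = gSec sp eps (List.drop (k + 1) lines) := h0
          show lines[k] :: List.drop (k + 1) lines = lines[k] :: gSec sp eps (List.drop (k + 1) lines)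
          rw [← h0']
        | some j =>
          have hj : k + 1 ≤ j := findEndB_ge lines sp eps (n + 1) (k + 1) j (by omega) h
          have h0 := ih (k + 1) (by omega)
          rw [h] at h0
          have h0' : List.take (j - (k + 1)) (List.drop (k + 1) lines) = gSec sp eps (List.drop (k + 1) lines) := h0
          show List.take (j - k) (lines[k] :: List.drop (k + 1) lines) = lines[k] :: gSec sp eps (List.drop (k + 1) lines)
          have htake : j - k = (j - (k + 1)) + 1 := by omega
          rw [htake, List.take_succ_cons, h0']
      · rw [if_neg h1]
        by_cases h2 : eps.any (fun p => PySem.Str.startswith lines[k] p) = true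
        · rw [if_pos h2]
          simp only [gSec, if_neg h1, if_pos h2, Nat.sub_self, List.take_zero]
        · rw [if_neg h2]
          simp only [gSec, if_neg h1, if_neg h2]
          cases h : findEndB lines sp eps (k + 1) with
          | none =>
            have h0 := ih (k + 1) (by omega)
            rw [h] at h0
            have h0' : List.drop (k + 1) lines = gSec sp eps (List.drop (k + 1) lines) := h0
            show lines[k] :: List.drop (k + 1) lines = lines[k] :: gSec sp eps (List.drop (k + 1) lines)
            rw [← h0']
          | some j =>
            have hj : k + 1 ≤ j := findEndB_ge lines sp eps (n + 1) (k + 1) j (by omega) h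
            have h0 := ih (k + 1) (by omega)
            rw [h] at h0
            have h0' : List.take (j - (k + 1)) (List.drop (k + 1) lines) = gSec sp eps (List.drop (k + 1) lines) := h0
            show List.take (j - k) (lines[k] :: List.drop (k + 1) lines) = lines[k] :: gSec sp eps (List.drop (k + 1) lines)
            have htake : j - k = (j - (k + 1)) + 1 := by omega
            rw [htake, List.take_succ_cons, h0']
    · rw [findEndB, dif_neg hk, List.drop_eq_nil_of_le (by omega)]
      simp [gSec]

-- ===== VERDICT (by name: the statement is the Claim_ definition above) =====
theorem slice_section_spec : Claim_equal_slice_section := by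
  intro lines sp eps _
  unfold Spec_slice_section slice_section slice_section_alt
  rw [sliceALoop_false]
  cases h : lines.findIdx? (fun l => PySem.Str.startswith l sp) with
  | none => rfl
  | some i =>
    obtain ⟨hi, hp⟩ := findIdx?_spec _ lines i h
    have hpd : PySem.Str.startswith lines[i] sp = true := by
      rwa [List.getD_eq_getElem lines default hi] at hp
    have hdrop : lines.drop i = lines[i] :: lines.drop (i + 1) := List.drop_eq_getElem_cons hi
    simp only [List.nil_append]
    cases hE : findEndB lines sp eps (i + 1) with
    | none =>
      show gSec sp eps (List.drop i lines) = PySem.List.slice lines (some (i : Int)) none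
      rw [PySem.List.slice_from_natCast]
      have h0 := findEndB_gSec lines sp eps (lines.length - (i + 1)) (i + 1) (by omega)
      rw [hE] at h0
      have h0' : List.drop (i + 1) lines = gSec sp eps (List.drop (i + 1) lines) := h0
      rw [hdrop]
      simp only [gSec, if_pos hpd]
      rw [← h0']
    | some j =>
      show gSec sp eps (List.drop i lines) = PySem.List.slice lines (some (i : Int)) (some (j : Int))
      rw [PySem.List.slice_natCast]
      have hj : i + 1 ≤ j := findEndB_ge lines sp eps (lines.length - (i + 1)) (i + 1) j (by omega) hE
      have h0 := findEndB_gSec lines sp eps (lines.length - (i + 1)) (i + 1) (by omega)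
      rw [hE] at h0
      have h0' : List.take (j - (i + 1)) (List.drop (i + 1) lines) = gSec sp eps (List.drop (i + 1) lines) := h0
      rw [hdrop]
      have htake : j - i = (j - (i + 1)) + 1 := by omega
      rw [htake, List.take_succ_cons, h0']
      simp only [gSec, if_pos hpd]
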